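-- pv_equiv track=rewrite | github.com/rudraneel93/Digital-Root | Digital Root/main.py | get_sequence_info
-- ===== SOURCE A (Python) =====
-- def digit_sum(n):
--     return sum(int(d) for d in str(n))
--
-- def f(n):
--     if n % 2 == 1:
--         return n + digit_sum(n)
--     else:
--         return n - digit_sum(n)
--
-- def get_sequence_info(n):
--     steps = 0
--     current = n
--     visited = {}
--     t9_step = None
--     while True:
--         if current % 9 == 0 and t9_step is None:
--             t9_step = steps
--         if current == 0:
--             cycle_value = 0
--             steps_until_cycle = steps
--             break
--         if current in visited:
--             cycle_value = current
--             steps_until_cycle = visited[current]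
--             break
--         visited[current] = steps
--         current = f(current)
--         steps += 1
--     return {
--         'n': n,
--         'steps_until_cycle': steps_until_cycle,
--         'cycle_value': cycle_value,
--         't9_step': t9_step
--     }
-- ===== SOURCE B (Python) =====
-- def digit_sum(n):
--     return sum(int(d) for d in str(n))
--
-- def f(n):
--     if n % 2 == 1:
--         return n + digit_sum(n)
--     else:
--         return n - digit_sum(n)
--
-- def get_sequence_info(n):
--     # Pass 1: find the terminal value (0 or the first value that recurs),
--     # remembering only WHICH values were seen, not where.
--     seen = set()
--     current = n
--     while current != 0 and current not in seen:
--         seen.add(current)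
--         current = f(current)
--     cycle_value = current
--     # Pass 2: steps_until_cycle = first time the orbit hits cycle_value.
--     steps_until_cycle = 0
--     current = n
--     while current != cycle_value:
--         current = f(current)
--         steps_until_cycle += 1
--     # Pass 3: length of the cycle through cycle_value.
--     if cycle_value == 0:
--         cycle_len = 1
--     else:
--         cycle_len = 1
--         current = f(cycle_value)
--         while current != cycle_value:
--             current = f(current)
--             cycle_len += 1
--     # Pass 4: first multiple of 9; tail + one full cycle + re-entry covers
--     # every distinct value the orbit ever takes.
--     count = steps_until_cycle + cycle_len + 1
--     t9_step = None
--     current = n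
--     for i in range(count):
--         if current % 9 == 0:
--             t9_step = i
--             break
--         current = f(current)
--     return {
--         'n': n,
--         'steps_until_cycle': steps_until_cycle,
--         'cycle_value': cycle_value,
--         't9_step': t9_step
--     }
-- ===== Notes on version B (the rewrite author's own statement) =====
-- stated objective: alternative
-- what changed: A runs one loop that memoizes every value's index in a dict and tracks t9 inline; B detects only the terminal value with a plain membership set and then reconstructs the answers by three separate re-walks of the orbit: a counting walk to the terminal's first occurrence (steps_until_cycle), a walk around the cycle to measure its length, and a bounded scan of tail+cycle for the first multiple of 9 (time-for-space reconstruction, no indices stored).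
import Mathlib
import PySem

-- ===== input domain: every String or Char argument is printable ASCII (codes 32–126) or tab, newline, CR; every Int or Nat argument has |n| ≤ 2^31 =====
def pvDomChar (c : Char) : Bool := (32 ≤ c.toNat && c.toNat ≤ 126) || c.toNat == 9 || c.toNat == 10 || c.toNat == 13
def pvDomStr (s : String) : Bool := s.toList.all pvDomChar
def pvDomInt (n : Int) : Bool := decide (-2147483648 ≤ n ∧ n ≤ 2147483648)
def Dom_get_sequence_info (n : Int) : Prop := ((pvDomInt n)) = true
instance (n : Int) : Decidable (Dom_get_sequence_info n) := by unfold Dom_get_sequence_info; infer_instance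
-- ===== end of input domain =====

-- B replaces A's single dict-memoizing loop by set-based terminal detection plus three
-- reconstruction re-walks of the orbit; objective: alternative (same cost, no stored indices).

-- ===== PORT A =====
-- shared module helper: digit_sum(n) = sum(int(d) for d in str(n)); none = ValueError (for n < 0)
def digit_sum? (n : Int) : Option Int :=
  (PySem.Int.toChars n).foldl
    (fun acc d => acc.bind (fun a => (PySem.Int.ofChars? [d]).map (fun v => a + v))) (some 0)

-- shared module helper f(n)
def f? (n : Int) : Option Int :=
  if PySem.Int.mod n 2 == 1 then (digit_sum? n).map (fun s => n + s)
  else (digit_sum? n).map (fun s => n - s)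

def pvFuel : Nat := 1000000  -- totality guard for the while-loops; never exhausted on terminating runs

-- A's while-loop; returns (steps_until_cycle, cycle_value, t9_step); none = fuel out or ValueError.
-- visited[current] is ported as getD under the contains guard (Python cannot raise KeyError there).
def loopA (fuel : Nat) (current steps : Int) (visited : PySem.Dict Int Int) (t9 : Option Int) :
    Option (Int × Int × Option Int) :=
  match fuel with
  | 0 => none
  | fuel + 1 =>
    let t9' := if PySem.Int.mod current 9 == 0 && t9.isNone then some steps else t9
    if current == 0 then some (steps, 0, t9')
    else if visited.contains current then some (visited.getD current 0, current, t9')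
    else match f? current with
      | none => none
      | some nxt => loopA fuel nxt (steps + 1) (visited.insert current steps) t9'

def get_sequence_info (n : Int) : List (String × Option Int) :=
  match loopA pvFuel n 0 PySem.Dict.empty none with
  | none => []
  | some (suc, cv, t9) =>
    [("n", some n), ("steps_until_cycle", some suc), ("cycle_value", some cv), ("t9_step", t9)]

-- ===== PORT B =====
-- Pass 1: walk until 0 or a repeat, remembering only the SET of seen values; returns the terminal.
def pass1B (fuel : Nat) (current : Int) (seen : PySem.Set Int) : Option Int :=
  match fuel with
  | 0 => none
  | fuel + 1 =>
    if current == 0 || seen.contains current then some current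
    else match f? current with
      | none => none
      | some nxt => pass1B fuel nxt (seen.add current)

-- Pass 2: count steps from n until the orbit first hits cv.
def pass2B (fuel : Nat) (current cv steps : Int) : Option Int :=
  match fuel with
  | 0 => none
  | fuel + 1 =>
    if current == cv then some steps
    else match f? current with
      | none => none
      | some nxt => pass2B fuel nxt cv (steps + 1)

-- Pass 3 loop: walk from current until cv reappears, counting.
def pass3B (fuel : Nat) (current cv len : Int) : Option Int :=
  match fuel with
  | 0 => none
  | fuel + 1 =>
    if current == cv then some len
    else match f? current with
      | none => none
      | some nxt => pass3B fuel nxt cv (len + 1)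

-- Pass 4: for i in range(count): if current % 9 == 0: return i; current = f(current); else None.
def scan9B (count : Nat) (current idx : Int) : Option (Option Int) :=
  match count with
  | 0 => some none
  | count + 1 =>
    if PySem.Int.mod current 9 == 0 then some (some idx)
    else match f? current with
      | none => none
      | some nxt => scan9B count nxt (idx + 1)

def get_sequence_info_alt (n : Int) : List (String × Option Int) :=
  match pass1B pvFuel n PySem.Set.empty with
  | none => []
  | some cv =>
    match pass2B pvFuel n cv 0 with
    | none => []
    | some suc =>
      let len? : Option Int :=
        if cv == 0 then some 1
        else match f? cv with
          | none => none
          | some a => pass3B pvFuel a cv 1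
      match len? with
      | none => []
      | some len =>
        match scan9B (suc + len + 1).toNat n 0 with
        | none => []
        | some t9 =>
          [("n", some n), ("steps_until_cycle", some suc), ("cycle_value", some cv),
           ("t9_step", t9)]

-- ===== PRECONDITION & SPEC =====
-- Pre_ excludes n < 0: there digit_sum meets the '-' sign character and Python A raises ValueError.
def Pre_get_sequence_info (n : Int) : Prop := 0 ≤ n
instance (n : Int) : Decidable (Pre_get_sequence_info n) := by unfold Pre_get_sequence_info; infer_instance
def pvWitness_get_sequence_info : Int := (13)

def Spec_get_sequence_info (n : Int) (out : List (String × Option Int)) : Prop := out = get_sequence_info_alt n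
instance (n : Int) (out : List (String × Option Int)) : Decidable (Spec_get_sequence_info n out) := by unfold Spec_get_sequence_info; infer_instance

-- ===== CLAIM (what is proved, stated in full; the proofs are below) =====
def Claim_equal_get_sequence_info : Prop := ∀ (n : Int), Dom_get_sequence_info n → Pre_get_sequence_info n → Spec_get_sequence_info n (get_sequence_info n)

-- ===== LEMMAS AND PROOFS =====

-- first index ≥ i (counting from i) of a multiple of 9 in xs
def firstT9 (i : Int) (xs : List Int) : Option Int :=
  match xs with
  | [] => none
  | v :: rest => if PySem.Int.mod v 9 == 0 then some i else firstT9 (i + 1) rest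

-- RunF a xs t: starting from a, the orbit visits exactly the values xs and then reaches t
def RunF (a : Int) (xs : List Int) (t : Int) : Prop :=
  match xs with
  | [] => t = a
  | x :: r => x = a ∧ ∃ b, f? a = some b ∧ RunF b r t

theorem firstT9_append (xs : List Int) (i : Int) (v : Int) :
    firstT9 i (xs ++ [v]) =
      ((firstT9 i xs).or
        (if PySem.Int.mod v 9 == 0 then some (i + (xs.length : Int)) else none)) := by
  induction xs generalizing i with
  | nil => simp [firstT9]
  | cons h t ih =>
    simp only [List.cons_append, firstT9]
    by_cases h9 : (PySem.Int.mod h 9 == 0) = true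
    · rw [if_pos h9, if_pos h9]; rfl
    · rw [if_neg h9, if_neg h9, ih]
      have hi : i + 1 + (t.length : Int) = i + ((t.length : Int) + 1) := by ring
      simp only [List.length_cons, Nat.cast_add, Nat.cast_one, hi]

-- A's inline t9 update equals rescanning the extended orbit
theorem t9_step_eq (seq : List Int) (current : Int) :
    (if PySem.Int.mod current 9 == 0 && (firstT9 0 seq).isNone then some (seq.length : Int)
     else firstT9 0 seq) = firstT9 0 (seq ++ [current]) := by
  rw [firstT9_append]
  cases h : firstT9 0 seq with
  | some j => simp
  | none => simp

theorem idxOf_append_self (pre : List Int) (x : Int) (h : x ∉ pre) :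
    (pre ++ [x]).idxOf x = pre.length := by
  induction pre with
  | nil => simp
  | cons y r ih =>
    simp only [List.mem_cons, not_or] at h
    simp only [List.cons_append, List.length_cons]
    rw [List.idxOf_cons_ne _ (fun hyx => h.1 hyx.symm), ih h.2]

theorem idxOf_append_left (pre l : List Int) (x : Int) (h : x ∈ pre) :
    (pre ++ l).idxOf x = pre.idxOf x := by
  induction pre with
  | nil => simp at h
  | cons y r ih =>
    by_cases hyx : y = x
    · subst hyx; simp [List.idxOf_cons_self]
    · rcases List.mem_cons.mp h with h' | h'
      · exact absurd h'.symm hyx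
      · simp only [List.cons_append]
        rw [List.idxOf_cons_ne _ hyx, List.idxOf_cons_ne _ hyx, ih h']

theorem RunF_snoc (a : Int) (xs : List Int) (c nxt : Int)
    (h : RunF a xs c) (hf : f? c = some nxt) : RunF a (xs ++ [c]) nxt := by
  induction xs generalizing a with
  | nil =>
    simp only [RunF] at h
    subst h
    exact ⟨rfl, nxt, hf, rfl⟩
  | cons x r ih =>
    obtain ⟨hx, b, hb, hr⟩ := h
    exact ⟨hx, b, hb, ih b hr⟩

theorem loopA_char (fuel : Nat) :
    ∀ (n current : Int) (pre : List Int) (visited : PySem.Dict Int Int)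
      (r : Int × Int × Option Int),
      RunF n pre current →
      pre.Nodup → (0 : Int) ∉ pre →
      (∀ x, visited.contains x = decide (x ∈ pre)) →
      (∀ x d, visited.getD x d = if x ∈ pre then (pre.idxOf x : Int) else d) →
      loopA fuel current (pre.length : Int) visited (firstT9 0 pre) = some r →
      ∃ ext t, RunF n (pre ++ ext) t ∧ (pre ++ ext).Nodup ∧ (0 : Int) ∉ (pre ++ ext) ∧
        ext.length < fuel ∧ (t = 0 ∨ t ∈ pre ++ ext) ∧
        r = (if t = 0 then ((pre ++ ext).length : Int) else ((pre ++ ext).idxOf t : Int), t,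
             firstT9 0 ((pre ++ ext) ++ [t])) := by
  induction fuel with
  | zero => intro n current pre visited r _ _ _ _ _ heq; cases heq
  | succ fuel ih =>
    intro n current pre visited r hrun hnd h0pre hcont hgetD heq
    simp only [loopA] at heq
    rw [t9_step_eq pre current] at heq
    by_cases h0 : (current == 0) = true
    · have hcur : current = 0 := by simpa using h0
      rw [if_pos h0] at heq
      replace heq := (Option.some.inj heq).symm
      refine ⟨[], 0, ?_, ?_, ?_, ?_, Or.inl rfl, ?_⟩
      · simpa using (hcur ▸ hrun)
      · simpa using hnd
      · simpa using h0pre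
      · simp
      · rw [heq, hcur]
        simp
    · by_cases hc : visited.contains current = true
      · have hmem : current ∈ pre := by
          have := hcont current
          rw [hc] at this
          exact of_decide_eq_true this.symm
        rw [if_neg h0, if_pos hc] at heq
        replace heq := (Option.some.inj heq).symm
        have hne0 : current ≠ 0 := by simpa using h0
        refine ⟨[], current, ?_, ?_, ?_, ?_, Or.inr (by simpa using hmem), ?_⟩
        · simpa using hrun
        · simpa using hnd
        · simpa using h0pre
        · simp
        · rw [heq, hgetD current 0, if_pos hmem]
          simp [hne0]
      · have hnmem : current ∉ pre := by
          have := hcont current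
          rw [eq_false_of_ne_true hc] at this
          exact of_decide_eq_false this.symm
        rw [if_neg h0] at heq
        rw [eq_false_of_ne_true hc] at heq
        simp only [Bool.false_eq_true, if_false] at heq
        cases hf : f? current with
        | none => rw [hf] at heq; cases heq
        | some nxt =>
          rw [hf] at heq
          have hne0 : current ≠ 0 := by simpa using h0
          have h1 : RunF n (pre ++ [current]) nxt := RunF_snoc n pre current nxt hrun hf
          have h2 : (pre ++ [current]).Nodup := by
            rw [List.nodup_append]
            refine ⟨hnd, List.nodup_singleton _, ?_⟩
            intro a ha b hb
            rw [List.mem_singleton] at hb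
            subst hb
            exact fun h => hnmem (h ▸ ha)
          have h3 : (0 : Int) ∉ pre ++ [current] := by
            simp only [List.mem_append, List.mem_singleton, not_or]
            exact ⟨h0pre, fun h => hne0 h.symm⟩
          have h4 : ∀ x, (visited.insert current (pre.length : Int)).contains x
              = decide (x ∈ pre ++ [current]) := by
            intro x
            rw [PySem.Dict.contains_insert, hcont x]
            by_cases hx : x = current
            · subst hx; simp
            · have : (x == current) = false := by simp [hx]
              simp [this, hx]
          have h5 : ∀ x d, (visited.insert current (pre.length : Int)).getD x d
              = if x ∈ pre ++ [current] then ((pre ++ [current]).idxOf x : Int) else d := by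
            intro x d
            rw [PySem.Dict.getD_insert]
            by_cases hx : x = current
            · subst hx
              rw [if_pos rfl, if_pos (by simp), idxOf_append_self pre x hnmem]
            · rw [if_neg hx, hgetD x d]
              by_cases hxm : x ∈ pre
              · rw [if_pos hxm, if_pos (by simp [hxm]), idxOf_append_left pre [current] x hxm]
              · rw [if_neg hxm, if_neg (by simp [hxm, hx])]
          have hlen : (pre.length : Int) + 1 = (((pre ++ [current]).length : Nat) : Int) := by
            simp
          rw [hlen] at heq
          obtain ⟨ext', t, ha, hb', hc', hd, he, hr⟩ :=
            ih n nxt (pre ++ [current]) (visited.insert current (pre.length : Int)) r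
              h1 h2 h3 h4 h5 heq
          refine ⟨current :: ext', t, ?_, ?_, ?_, ?_, ?_, ?_⟩ <;>
            try rw [show pre ++ current :: ext' = (pre ++ [current]) ++ ext' by simp]
          · exact ha
          · exact hb'
          · exact hc'
          · simpa using Nat.succ_lt_succ hd
          · exact he
          · exact hr

theorem pass1_loopA (fuel : Nat) :
    ∀ (current steps : Int) (visited : PySem.Dict Int Int) (seen : PySem.Set Int)
      (t9 : Option Int),
      (∀ x, seen.contains x = visited.contains x) →
      pass1B fuel current seen = (loopA fuel current steps visited t9).map (fun r => r.2.1) := by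
  induction fuel with
  | zero => intro current steps visited seen t9 hseen; rfl
  | succ fuel ih =>
    intro current steps visited seen t9 hseen
    simp only [pass1B, loopA]
    by_cases h0 : (current == 0) = true
    · have hcur : current = 0 := by simpa using h0
      simp [hcur]
    · by_cases hc : visited.contains current = true
      · have hsc : seen.contains current = true := by rw [hseen current]; exact hc
        have hmemc : current ∈ seen := (PySem.Set.contains_iff seen current).mp hsc
        simp [h0, hc, hmemc]
      · have hc' : visited.contains current = false := eq_false_of_ne_true hc
        have hs' : seen.contains current = false := by rw [hseen current]; exact hc'
        simp only [h0, hs', Bool.or_self, Bool.false_eq_true, if_false, hc']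
        cases hf : f? current with
        | none => rfl
        | some nxt =>
          simp only []
          apply ih
          intro x
          rw [PySem.Dict.contains_insert]
          by_cases hx : x = current
          · subst hx
            have hmem : x ∈ PySem.Set.add seen x := (PySem.Set.mem_add seen x x).mpr (Or.inr rfl)
            rw [(PySem.Set.contains_iff (PySem.Set.add seen x) x).mpr hmem]
            simp
          · have hxb : (x == current) = false := by simp [hx]
            rw [hxb, Bool.false_or, ← hseen x]
            rw [Bool.eq_iff_iff, PySem.Set.contains_iff, PySem.Set.contains_iff,
              PySem.Set.mem_add seen current x]
            exact ⟨fun h => h.resolve_right hx, Or.inl⟩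

theorem pass2_not_mem (xs : List Int) :
    ∀ (fuel : Nat) (a t k : Int), RunF a xs t → t ∉ xs → xs.length < fuel →
      pass2B fuel a t k = some (k + (xs.length : Int)) := by
  induction xs with
  | nil =>
    intro fuel a t k h hnm hf
    simp only [RunF] at h
    subst h
    match fuel, hf with
    | fuel + 1, _ => simp [pass2B]
  | cons x r ih =>
    intro fuel a t k h hnm hf
    obtain ⟨hx, b, hb, hr⟩ := h
    subst hx
    simp only [List.mem_cons, not_or] at hnm
    match fuel, hf with
    | fuel + 1, hf =>
      have hne : (x == t) = false := by
        simp only [beq_eq_false_iff_ne, ne_eq]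
        exact fun hxt => hnm.1 hxt.symm
      simp only [pass2B, hne, Bool.false_eq_true, if_false, hb]
      rw [ih fuel b t (k + 1) hr hnm.2 (by simpa using hf)]
      congr 1
      simp only [List.length_cons]
      push_cast
      ring

theorem pass2_mem (xs : List Int) :
    ∀ (fuel : Nat) (a t cv k : Int), RunF a xs t → cv ∈ xs → xs.idxOf cv < fuel →
      pass2B fuel a cv k = some (k + (xs.idxOf cv : Int)) := by
  induction xs with
  | nil => intro fuel a t cv k h hm hf; simp at hm
  | cons x r ih =>
    intro fuel a t cv k h hm hf
    obtain ⟨hx, b, hb, hr⟩ := h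
    subst hx
    by_cases hcv : cv = x
    · subst hcv
      match fuel, hf with
      | fuel + 1, _ => simp [pass2B, List.idxOf_cons_self]
    · have hm' : cv ∈ r := by
        rcases List.mem_cons.mp hm with h' | h'
        · exact absurd h' hcv
        · exact h'
      have hidx : (x :: r).idxOf cv = r.idxOf cv + 1 := by
        simp [Ne.symm hcv]
      match fuel, hf with
      | fuel + 1, hf =>
        have hne : (x == cv) = false := by
          simp only [beq_eq_false_iff_ne, ne_eq]
          exact fun hxt => hcv hxt.symm
        simp only [pass2B, hne, Bool.false_eq_true, if_false, hb]
        rw [ih fuel b t cv (k + 1) hr hm' (by rw [hidx] at hf; omega)]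
        congr 1
        rw [hidx]
        push_cast
        ring

theorem pass3_spec (xs : List Int) :
    ∀ (fuel : Nat) (a cv k : Int), RunF a xs cv → cv ∉ xs → xs.length < fuel →
      pass3B fuel a cv k = some (k + (xs.length : Int)) := by
  induction xs with
  | nil =>
    intro fuel a cv k h hnm hf
    simp only [RunF] at h
    subst h
    match fuel, hf with
    | fuel + 1, _ => simp [pass3B]
  | cons x r ih =>
    intro fuel a cv k h hnm hf
    obtain ⟨hx, b, hb, hr⟩ := h
    subst hx
    simp only [List.mem_cons, not_or] at hnm
    match fuel, hf with
    | fuel + 1, hf =>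
      have hne : (x == cv) = false := by
        simp only [beq_eq_false_iff_ne, ne_eq]
        exact fun hxt => hnm.1 hxt.symm
      simp only [pass3B, hne, Bool.false_eq_true, if_false, hb]
      rw [ih fuel b cv (k + 1) hr hnm.2 (by simpa using hf)]
      congr 1
      simp only [List.length_cons]
      push_cast
      ring

theorem RunF_drop (xs : List Int) :
    ∀ (a t : Int) (i : Nat) (h : i < xs.length), RunF a xs t → RunF xs[i] (xs.drop i) t := by
  induction xs with
  | nil => intro a t i h; simp at h
  | cons x r ih =>
    intro a t i h hrun
    obtain ⟨hx, b, hb, hr⟩ := hrun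
    subst hx
    cases i with
    | zero => exact ⟨rfl, b, hb, hr⟩
    | succ j =>
      have hj : j < r.length := by simpa using h
      simpa using ih b t j hj hr

theorem scan_exact (xs : List Int) :
    ∀ (a t k : Int), RunF a xs t → (f? t).isSome →
      scan9B (xs.length + 1) a k = some (firstT9 k (xs ++ [t])) := by
  induction xs with
  | nil =>
    intro a t k h hsome
    simp only [RunF] at h
    subst h
    obtain ⟨b, hb⟩ := Option.isSome_iff_exists.mp hsome
    simp only [List.nil_append, List.length_nil, scan9B, firstT9, hb]
    by_cases h9 : (PySem.Int.mod t 9 == 0) = true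
    · rw [if_pos h9, if_pos h9]
    · rw [if_neg h9, if_neg h9]
  | cons x r ih =>
    intro a t k h hsome
    obtain ⟨hx, b, hb, hr⟩ := h
    subst hx
    simp only [List.length_cons, List.cons_append, firstT9, scan9B, hb]
    by_cases h9 : (PySem.Int.mod x 9 == 0) = true
    · rw [if_pos h9, if_pos h9]
    · rw [if_neg h9, if_neg h9]
      exact ih b t (k + 1) hr hsome

theorem scan_hit (xs : List Int) :
    ∀ (m : Nat) (a t k : Int), RunF a xs t → PySem.Int.mod t 9 = 0 →
      scan9B (xs.length + 1 + m) a k = some (firstT9 k (xs ++ [t])) := by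
  induction xs with
  | nil =>
    intro m a t k h h9
    simp only [RunF] at h
    subst h
    have hc : (0 : Nat) + 1 + m = m + 1 := by omega
    have h9' : (PySem.Int.mod t 9 == 0) = true := by rw [h9]; rfl
    rw [List.length_nil, hc]
    simp only [List.nil_append, scan9B, firstT9, h9', if_pos]
  | cons x r ih =>
    intro m a t k h h9
    obtain ⟨hx, b, hb, hr⟩ := h
    subst hx
    have hc : (x :: r).length + 1 + m = (r.length + 1 + m) + 1 := by
      simp only [List.length_cons]; omega
    rw [hc]
    simp only [List.cons_append, firstT9, scan9B, hb]
    by_cases hx9 : (PySem.Int.mod x 9 == 0) = true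
    · rw [if_pos hx9, if_pos hx9]
    · rw [if_neg hx9, if_neg hx9]
      exact ih m b t (k + 1) hr h9

-- ===== VERDICT (by name: the statement is the Claim_ definition above) =====
theorem get_sequence_info_spec : Claim_equal_get_sequence_info := by
  intro n _ _
  unfold Spec_get_sequence_info get_sequence_info get_sequence_info_alt
  have hp1 := pass1_loopA pvFuel n 0 PySem.Dict.empty PySem.Set.empty none
    (by intro x; rfl)
  cases hA : loopA pvFuel n 0 PySem.Dict.empty none with
  | none =>
    rw [hA] at hp1
    simp only [Option.map_none] at hp1
    rw [hp1]
  | some r =>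
    obtain ⟨suc, cv, t9⟩ := r
    rw [hA] at hp1
    simp only [Option.map_some] at hp1
    obtain ⟨ext, t, hrun, hnd, h0all, hfuel, hmemt, hreq⟩ :=
      loopA_char pvFuel n n [] PySem.Dict.empty (suc, cv, t9)
        rfl List.nodup_nil (List.not_mem_nil) (by intro x; rfl)
        (by intro x d; simp [PySem.Dict.getD_empty]) hA
    simp only [List.nil_append] at hrun hnd h0all hmemt hreq
    obtain ⟨hsuc, hcv, ht9⟩ : suc = _ ∧ cv = t ∧ t9 = _ := by
      simpa [Prod.ext_iff] using hreq
    rw [hp1]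
    dsimp only
    by_cases ht0 : t = 0
    · subst ht0
      subst hcv
      have hp2 : pass2B pvFuel n 0 0 = some (0 + (ext.length : Int)) :=
        pass2_not_mem ext pvFuel n 0 0 hrun h0all hfuel
      have hcnt : ((0 : Int) + (ext.length : Int) + 1 + 1).toNat = ext.length + 1 + 1 := by
        omega
      have hscan : scan9B (ext.length + 1 + 1) n 0 = some (firstT9 0 (ext ++ [0])) :=
        scan_hit ext 1 n 0 0 hrun (by decide)
      rw [hp2]
      dsimp only
      simp only [beq_self_eq_true, if_pos, hcnt, hscan]
      rw [hsuc, ht9]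
      simp
    · subst hcv
      have hmem : cv ∈ ext := hmemt.resolve_left ht0
      have hi : ext.idxOf cv < ext.length := List.idxOf_lt_length_of_mem hmem
      have hp2 : pass2B pvFuel n cv 0 = some (0 + (ext.idxOf cv : Int)) :=
        pass2_mem ext pvFuel n cv cv 0 hrun hmem (by omega)
      have hdrop : ext.drop (ext.idxOf cv) = cv :: ext.drop (ext.idxOf cv + 1) := by
        rw [← List.getElem_cons_drop hi, List.getElem_idxOf hi]
      have hrund := RunF_drop ext n cv (ext.idxOf cv) hi hrun
      rw [hdrop, List.getElem_idxOf hi] at hrund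
      obtain ⟨-, b, hb, hrest⟩ := hrund
      have hnotin : cv ∉ ext.drop (ext.idxOf cv + 1) := by
        have hndd : (ext.drop (ext.idxOf cv)).Nodup := hnd.sublist (List.drop_sublist _ _)
        rw [hdrop] at hndd
        exact (List.nodup_cons.mp hndd).1
      have hlrest : (ext.drop (ext.idxOf cv + 1)).length = ext.length - (ext.idxOf cv + 1) := by
        simp
      have hp3 : pass3B pvFuel b cv 1
          = some (1 + ((ext.drop (ext.idxOf cv + 1)).length : Int)) :=
        pass3_spec (ext.drop (ext.idxOf cv + 1)) pvFuel b cv 1 hrest hnotin (by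
          rw [hlrest]
          have : pvFuel = 1000000 := rfl
          omega)
      have hscan : scan9B (ext.length + 1) n 0 = some (firstT9 0 (ext ++ [cv])) :=
        scan_exact ext n cv 0 hrun (by rw [hb]; rfl)
      have htb : (cv == 0) = false := by simp [ht0]
      rw [hp2]
      dsimp only
      simp only [htb, Bool.false_eq_true, if_false, hb, hp3]
      rw [show ((0 : Int) + (ext.idxOf cv : Int)
            + (1 + ((ext.drop (ext.idxOf cv + 1)).length : Int))
            + 1).toNat = ext.length + 1 by rw [hlrest]; omega]
      rw [hscan]
      dsimp only
      rw [hsuc, ht9]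
      simp [ht0]
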